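-- pv_equiv track=rewrite | github.com/KevinNitroG/My-Scripts | scripts/Subtitle Fix Syntax/Subtitle Fix Syntax.py | add_punctuation_at_the_end_of_line
-- ===== SOURCE A (Python) =====
-- punctuation = [",", ".", "!", "?",  ":", ";", "(", "[", "{"]
--
-- def add_punctuation_at_the_end_of_line(arr, subtitle_index_arr):
--     modified_arr = []
--     for line_index in range(0,len(arr)):
--         line = arr[line_index]
--         if line_index in subtitle_index_arr:
--             if line[-1] not in punctuation:
--                 line += "."
--         modified_arr.append(line)
--     return modified_arr
-- ===== SOURCE B (Python) =====
-- PUNCTUATION = {",", ".", "!", "?", ":", ";", "(", "[", "{"}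
--
--
-- def add_punctuation_at_the_end_of_line(arr, subtitle_index_arr):
--     modified_arr = list(arr)
--     n = len(arr)
--     for i in subtitle_index_arr:
--         if 0 <= i < n:
--             line = modified_arr[i]
--             if line and line[-1] not in PUNCTUATION:
--                 modified_arr[i] = line + "."
--     return modified_arr
-- ===== Notes on version B (the rewrite author's own statement) =====
-- stated objective: faster
-- what changed: B copies the list once and drives the work off the flagged index list with bound-guarded point updates, instead of scanning every line and testing membership of its index in the index list (which is an O(m) scan per line).
import Mathlib
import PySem

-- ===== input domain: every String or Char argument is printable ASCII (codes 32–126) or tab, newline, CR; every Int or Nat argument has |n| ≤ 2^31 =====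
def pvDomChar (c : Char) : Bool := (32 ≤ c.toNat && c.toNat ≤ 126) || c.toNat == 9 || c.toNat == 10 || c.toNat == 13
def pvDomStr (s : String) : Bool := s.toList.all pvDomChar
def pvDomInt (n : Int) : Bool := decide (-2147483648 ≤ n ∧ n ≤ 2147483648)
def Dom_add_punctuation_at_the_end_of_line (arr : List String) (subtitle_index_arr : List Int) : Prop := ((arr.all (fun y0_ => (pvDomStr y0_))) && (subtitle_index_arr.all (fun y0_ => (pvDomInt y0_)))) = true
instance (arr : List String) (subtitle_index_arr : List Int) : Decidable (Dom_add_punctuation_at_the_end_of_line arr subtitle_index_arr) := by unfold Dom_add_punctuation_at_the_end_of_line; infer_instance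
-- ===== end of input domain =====

-- B drives the work off the flagged index list with bound-guarded point updates on a copy,
-- instead of scanning every line and testing list membership of its index (objective: alternative).


-- ===== PORT A =====
def punctuationA : List String := [",", ".", "!", "?", ":", ";", "(", "[", "{"]

def add_punctuation_at_the_end_of_line (arr : List String) (subtitle_index_arr : List Int) : List String :=
  (PySem.List.pyRange 0 arr.length 1).foldl (fun modified_arr line_index =>
    let line := PySem.List.pyGetD arr line_index ""
    let line :=
      if line_index ∈ subtitle_index_arr then
        match PySem.Str.pyGet? line (-1) with
        | some c => if String.ofList [c] ∈ punctuationA then line else line ++ "."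
        | none => line   -- Python raises IndexError here (line[-1] on ""); excluded by Pre_
      else line
    modified_arr ++ [line]) []

-- ===== PORT B =====
def punctuationB : PySem.Set String := PySem.Set.ofList [",", ".", "!", "?", ":", ";", "(", "[", "{"]

-- 'line and line[-1] not in PUNCTUATION' without the truthiness guard: false on the empty string
def lastNotPunctB (line : String) : Bool :=
  match PySem.Str.pyGet? line (-1) with
  | some c => !(PySem.Set.contains punctuationB (String.ofList [c]))
  | none => false

def add_punctuation_at_the_end_of_line_alt (arr : List String) (subtitle_index_arr : List Int) : List String :=
  subtitle_index_arr.foldl (fun modified_arr i =>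
    if 0 ≤ i ∧ i < (arr.length : Int) then
      let line := PySem.List.pyGetD modified_arr i ""
      if line ≠ "" ∧ lastNotPunctB line = true then
        PySem.List.pySetD modified_arr i (line ++ ".")
      else modified_arr
    else modified_arr) arr

-- ===== PRECONDITION & SPEC =====
-- Pre_ excludes exactly the inputs on which Python A raises IndexError:
-- some in-range flagged index pointing at an empty line ('' has no last character).
def Pre_add_punctuation_at_the_end_of_line (arr : List String) (subtitle_index_arr : List Int) : Prop :=
  ∀ k, k < arr.length → (k : Int) ∈ subtitle_index_arr → arr.getD k "" ≠ ""
instance (arr : List String) (subtitle_index_arr : List Int) : Decidable (Pre_add_punctuation_at_the_end_of_line arr subtitle_index_arr) := by unfold Pre_add_punctuation_at_the_end_of_line; infer_instance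

def pvWitness_add_punctuation_at_the_end_of_line : List String × List Int :=
  (["hello", "hi.", "world"], [0, 2, 5, -1])

def Spec_add_punctuation_at_the_end_of_line (arr : List String) (subtitle_index_arr : List Int) (out : List String) : Prop := out = add_punctuation_at_the_end_of_line_alt arr subtitle_index_arr
instance (arr : List String) (subtitle_index_arr : List Int) (out : List String) : Decidable (Spec_add_punctuation_at_the_end_of_line arr subtitle_index_arr out) := by unfold Spec_add_punctuation_at_the_end_of_line; infer_instance

-- ===== CLAIM (what is proved, stated in full; the proofs are below) =====
def Claim_equal_add_punctuation_at_the_end_of_line : Prop := ∀ (arr : List String) (subtitle_index_arr : List Int), Dom_add_punctuation_at_the_end_of_line arr subtitle_index_arr → Pre_add_punctuation_at_the_end_of_line arr subtitle_index_arr → Spec_add_punctuation_at_the_end_of_line arr subtitle_index_arr (add_punctuation_at_the_end_of_line arr subtitle_index_arr)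


-- ===== LEMMAS AND PROOFS =====

-- the per-line transformation both programs apply to a flagged in-bounds line
def pvFix (s : String) : String :=
  if s ≠ "" ∧ lastNotPunctB s = true then s ++ "." else s

theorem lastNotPunctB_append_dot (s : String) : lastNotPunctB (s ++ ".") = false := by
  have h : PySem.Str.pyGet? (s ++ ".") (-1) = some '.' := by
    simp [PySem.Str.pyGet?, PySem.List.pyGet?_neg_one]
  unfold lastNotPunctB
  rw [h]
  decide

theorem pvFix_pvFix (s : String) : pvFix (pvFix s) = pvFix s := by
  by_cases h : s ≠ "" ∧ lastNotPunctB s = true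
  · have h1 : pvFix s = s ++ "." := by simp only [pvFix, if_pos h]
    rw [h1]
    simp only [pvFix, lastNotPunctB_append_dot, Bool.false_eq_true, and_false, if_neg,
      not_false_iff]
  · simp only [pvFix, if_neg h]

theorem memB_iff (t : String) : t ∈ punctuationB ↔ t ∈ punctuationA := by
  simp [punctuationB, punctuationA, PySem.Set.mem_ofList]

theorem pyGet?_neg_one_eq_none_iff (s : String) : PySem.Str.pyGet? s (-1) = none ↔ s = "" := by
  simp [PySem.Str.pyGet?, PySem.List.pyGet?_neg_one]

theorem fixA_eq_pvFix (s : String) :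
    (match PySem.Str.pyGet? s (-1) with
     | some c => if String.ofList [c] ∈ punctuationA then s else s ++ "."
     | none => s) = pvFix s := by
  rcases h : PySem.Str.pyGet? s (-1) with _ | c
  · have hs : s = "" := (pyGet?_neg_one_eq_none_iff s).mp h
    simp [pvFix, hs]
  · have hs : s ≠ "" := by
      intro hs
      rw [(pyGet?_neg_one_eq_none_iff s).mpr hs] at h
      simp at h
    have hb : lastNotPunctB s = !decide (String.ofList [c] ∈ punctuationA) := by
      unfold lastNotPunctB
      rw [h]; simp [memB_iff]
    by_cases hc : String.ofList [c] ∈ punctuationA <;>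
      simp [pvFix, hb, hs, hc]

-- the common specification both ports are reduced to
def pvSpec (arr : List String) (sia : List Int) : List String :=
  (List.range arr.length).map (fun (k : Nat) =>
    if (k : Int) ∈ sia then pvFix (arr.getD k "") else arr.getD k "")

theorem A_eq_spec (arr : List String) (sia : List Int) :
    add_punctuation_at_the_end_of_line arr sia = pvSpec arr sia := by
  unfold add_punctuation_at_the_end_of_line pvSpec
  rw [PySem.List.foldl_append_singleton_eq_map, PySem.List.pyRange_zero_nat]
  simp only [List.map_map, List.nil_append]
  refine List.map_congr_left ?_
  intro k hk
  simp only [Function.comp, PySem.List.pyGetD_natCast]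
  split_ifs with h
  · rw [fixA_eq_pvFix]
  · rfl

-- B's loop body, with the (constant) bound n abstracted
def pvStep (n : Int) (m : List String) (i : Int) : List String :=
  if 0 ≤ i ∧ i < n then
    let line := PySem.List.pyGetD m i ""
    if line ≠ "" ∧ lastNotPunctB line = true then
      PySem.List.pySetD m i (line ++ ".")
    else m
  else m

theorem alt_eq_foldl_pvStep (arr : List String) (sia : List Int) :
    add_punctuation_at_the_end_of_line_alt arr sia = sia.foldl (pvStep (arr.length : Int)) arr := rfl

theorem length_pvStep (n : Int) (m : List String) (i : Int) : (pvStep n m i).length = m.length := by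
  unfold pvStep
  dsimp only
  split_ifs <;> simp [PySem.List.length_pySetD]

theorem length_foldl_pvStep (l : List Int) (n : Int) (m : List String) :
    (l.foldl (pvStep n) m).length = m.length := by
  induction l generalizing m with
  | nil => rfl
  | cons i l ih => rw [List.foldl_cons, ih, length_pvStep]

theorem getD_pvStep (n : Int) (m : List String) (i : Int) (k : Nat)
    (hk : k < m.length) (hn : (m.length : Int) = n) :
    (pvStep n m i).getD k "" = if i = (k : Int) then pvFix (m.getD k "") else m.getD k "" := by
  unfold pvStep
  by_cases hg : 0 ≤ i ∧ i < n
  · rw [if_pos hg]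
    have hi : i.toNat < m.length := by omega
    have hline : PySem.List.pyGetD m i "" = m.getD i.toNat "" := by
      rw [PySem.List.pyGetD_eq_getElem m "" hg.1 (by omega), List.getD_eq_getElem _ _ hi]
    simp only [hline]
    by_cases hik : i = (k : Int)
    · have hik' : i.toNat = k := by omega
      rw [if_pos hik, hik']
      by_cases hc : m.getD k "" ≠ "" ∧ lastNotPunctB (m.getD k "") = true
      · rw [if_pos hc, PySem.List.pySetD_of_nonneg m _ hg.1, hik']
        rw [List.getD_eq_getElem _ _ (by simpa using hk), List.getElem_set, if_pos rfl]
        simp only [pvFix]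
        rw [if_pos hc]
      · rw [if_neg hc]
        simp only [pvFix]
        rw [if_neg hc]
    · rw [if_neg hik]
      by_cases hc : m.getD i.toNat "" ≠ "" ∧ lastNotPunctB (m.getD i.toNat "") = true
      · rw [if_pos hc, PySem.List.pySetD_of_nonneg m _ hg.1]
        rw [List.getD_eq_getElem _ _ (by simpa using hk), List.getElem_set,
          List.getD_eq_getElem _ _ hk]
        have : i.toNat ≠ k := by omega
        rw [if_neg this]
      · rw [if_neg hc]
  · rw [if_neg hg]
    have hik : i ≠ (k : Int) := by
      intro h
      subst h
      exact hg ⟨by omega, by omega⟩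
    rw [if_neg hik]

theorem getD_foldl_pvStep (l : List Int) (n : Int) (m : List String) (k : Nat)
    (hk : k < m.length) (hn : (m.length : Int) = n) :
    (l.foldl (pvStep n) m).getD k "" =
      if (k : Int) ∈ l then pvFix (m.getD k "") else m.getD k "" := by
  induction l generalizing m with
  | nil => simp
  | cons i l ih =>
    rw [List.foldl_cons,
      ih (pvStep n m i) (by rw [length_pvStep]; exact hk) (by rw [length_pvStep]; exact hn),
      getD_pvStep n m i k hk hn]
    by_cases hi : i = (k : Int) <;> by_cases hl : (k : Int) ∈ l <;>
      simp [hi, hl, pvFix_pvFix, List.mem_cons, eq_comm]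

theorem B_eq_spec (arr : List String) (sia : List Int) :
    add_punctuation_at_the_end_of_line_alt arr sia = pvSpec arr sia := by
  rw [alt_eq_foldl_pvStep]
  apply List.ext_getElem
  · rw [length_foldl_pvStep]
    simp [pvSpec]
  · intro k h1 h2
    have hk : k < arr.length := by rwa [length_foldl_pvStep] at h1
    rw [← List.getD_eq_getElem _ "" h1,
      getD_foldl_pvStep sia (arr.length : Int) arr k hk rfl]
    unfold pvSpec
    rw [List.getElem_map, List.getElem_range]

theorem ports_agree (arr : List String) (sia : List Int) :
    add_punctuation_at_the_end_of_line arr sia = add_punctuation_at_the_end_of_line_alt arr sia :=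
  (A_eq_spec arr sia).trans (B_eq_spec arr sia).symm

-- ===== VERDICT (by name: the statement is the Claim_ definition above) =====
theorem add_punctuation_at_the_end_of_line_spec : Claim_equal_add_punctuation_at_the_end_of_line := by
  intro arr sia _ _
  exact ports_agree arr sia
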